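-- pv_equiv track=rewrite | github.com/innovationwizard/orion | scripts/sync_reservations.py | fuzzy_client_eq
-- ===== SOURCE A (Python) =====
-- import unicodedata
--
-- def strip_accents(s: str) -> str:
--     nfkd = unicodedata.normalize("NFKD", s)
--     return "".join(c for c in nfkd if not unicodedata.combining(c))
--
-- def fuzzy_client_eq(excel_clients: list[str], db_client_str: str | None) -> bool:
--     """Compare client name lists (fuzzy)."""
--     if db_client_str is None:
--         return len(excel_clients) == 0
--     db_clients = [c.strip() for c in db_client_str.split("/") if c.strip()]
--     if len(excel_clients) != len(db_clients):
--         return False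
--     excel_sorted = sorted(strip_accents(c).lower() for c in excel_clients)
--     db_sorted = sorted(strip_accents(c).lower() for c in db_clients)
--     return excel_sorted == db_sorted
-- ===== SOURCE B (Python) =====
-- import unicodedata
--
-- def strip_accents(s: str) -> str:
--     nfkd = unicodedata.normalize("NFKD", s)
--     return "".join(c for c in nfkd if not unicodedata.combining(c))
--
-- def _tally(names):
--     """Frequency table of the normalized names."""
--     counts = {}
--     for c in names:
--         k = strip_accents(c).lower()
--         counts[k] = counts.get(k, 0) + 1
--     return counts
--
-- def fuzzy_client_eq(excel_clients: list[str], db_client_str: str | None) -> bool: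
--     """Compare client name lists (fuzzy)."""
--     if db_client_str is None:
--         return len(excel_clients) == 0
--     db_clients = [c.strip() for c in db_client_str.split("/") if c.strip()]
--     if len(excel_clients) != len(db_clients):
--         return False
--     return _tally(excel_clients) == _tally(db_clients)
-- ===== Notes on version B (the rewrite author's own statement) =====
-- stated objective: alternative
-- what changed: Replaces sorting both normalized name lists and comparing the sorted lists with building a frequency table (dict of counts) per side in one pass and comparing the two tables as mappings.
import Mathlib
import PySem

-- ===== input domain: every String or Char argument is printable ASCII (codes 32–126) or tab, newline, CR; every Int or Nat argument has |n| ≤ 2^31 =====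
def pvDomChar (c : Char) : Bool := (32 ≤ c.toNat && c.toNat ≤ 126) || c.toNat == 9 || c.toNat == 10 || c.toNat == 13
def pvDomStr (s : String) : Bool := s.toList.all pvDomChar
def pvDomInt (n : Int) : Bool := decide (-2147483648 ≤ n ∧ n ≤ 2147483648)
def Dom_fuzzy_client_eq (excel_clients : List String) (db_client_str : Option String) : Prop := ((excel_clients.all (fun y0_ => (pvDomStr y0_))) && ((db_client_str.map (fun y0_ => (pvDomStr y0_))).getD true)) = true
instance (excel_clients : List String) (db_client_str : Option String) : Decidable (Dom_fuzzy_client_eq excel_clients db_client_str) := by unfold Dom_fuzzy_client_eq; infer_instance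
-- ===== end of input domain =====

-- B replaces A's sort-both-lists-and-compare with a one-pass frequency table per side compared as mappings (objective: alternative).


-- ===== PORT A =====
-- hand port of strip_accents: on the printable-ASCII domain NFKD normalization is the identity
-- and no ASCII character is combining, so the function is the identity there (exact on Dom).
def strip_accents (s : String) : String := s

def fuzzy_client_eq (excel_clients : List String) (db_client_str : Option String) : Bool :=
  match db_client_str with
  | none => excel_clients.length == 0
  | some s =>
    -- split? is some: the separator "/" is a nonempty literal
    let db_clients := (((PySem.Str.split? s "/").getD []).filter
        (fun c => !(PySem.Str.strip c == ""))).map (fun c => PySem.Str.strip c)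
    if excel_clients.length != db_clients.length then false
    else
      let excel_sorted := PySem.List.sorted
        (excel_clients.map (fun c => PySem.Str.lower (strip_accents c))) (fun x => x) false
      let db_sorted := PySem.List.sorted
        (db_clients.map (fun c => PySem.Str.lower (strip_accents c))) (fun x => x) false
      excel_sorted == db_sorted

-- ===== PORT B =====
-- _tally: one pass building the dict of counts of the normalized names
def pvTally (names : List String) : PySem.Dict String Int :=
  names.foldl (fun d c =>
    d.insert (PySem.Str.lower (strip_accents c))
      (d.getD (PySem.Str.lower (strip_accents c)) 0 + 1)) PySem.Dict.empty

-- Python dict '==' ignores insertion order: mapping equality, compared via getD _ 0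
-- (exact here: a tally never stores the value 0)
def pvDictEq (d e : PySem.Dict String Int) : Bool :=
  d.keys.all (fun k => e.getD k 0 == d.getD k 0) && e.keys.all (fun k => d.getD k 0 == e.getD k 0)

def fuzzy_client_eq_alt (excel_clients : List String) (db_client_str : Option String) : Bool :=
  match db_client_str with
  | none => excel_clients.length == 0
  | some s =>
    -- split? is some: the separator "/" is a nonempty literal
    let db_clients := (((PySem.Str.split? s "/").getD []).filter
        (fun c => !(PySem.Str.strip c == ""))).map (fun c => PySem.Str.strip c)
    if excel_clients.length != db_clients.length then false
    else pvDictEq (pvTally excel_clients) (pvTally db_clients)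

-- ===== PRECONDITION & SPEC =====
def Spec_fuzzy_client_eq (excel_clients : List String) (db_client_str : Option String) (out : Bool) : Prop := out = fuzzy_client_eq_alt excel_clients db_client_str
instance (excel_clients : List String) (db_client_str : Option String) (out : Bool) : Decidable (Spec_fuzzy_client_eq excel_clients db_client_str out) := by unfold Spec_fuzzy_client_eq; infer_instance

-- ===== CLAIM (what is proved, stated in full; the proofs are below) =====
def Claim_equal_fuzzy_client_eq : Prop := ∀ (excel_clients : List String) (db_client_str : Option String), Dom_fuzzy_client_eq excel_clients db_client_str → Spec_fuzzy_client_eq excel_clients db_client_str (fuzzy_client_eq excel_clients db_client_str)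

-- ===== LEMMAS AND PROOFS =====

-- the tally over names IS the counter of the normalized names
theorem pvTally_eq_counter (names : List String) :
    pvTally names = PySem.Dict.counter (names.map (fun c => PySem.Str.lower (strip_accents c))) := by
  rw [pvTally, ← PySem.Dict.foldl_insert_getD_add_one_eq_counter, List.foldl_map]

-- mapping equality of two counters is count-wise equality
theorem pvDictEq_counter_iff (a b : List String) :
    pvDictEq (PySem.Dict.counter a) (PySem.Dict.counter b) = true ↔ ∀ v, a.count v = b.count v := by
  simp only [pvDictEq, Bool.and_eq_true, List.all_eq_true, PySem.Dict.keys_counter,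
    PySem.Dict.getD_counter, beq_iff_eq, PySem.Set.mem_ofList, Nat.cast_inj]
  constructor
  · rintro ⟨h1, h2⟩ v
    by_cases hv : v ∈ a
    · exact (h1 v hv).symm
    · by_cases hw : v ∈ b
      · exact h2 v hw
      · rw [List.count_eq_zero_of_not_mem hv, List.count_eq_zero_of_not_mem hw]
  · intro h
    exact ⟨fun v _ => (h v).symm, fun v _ => h v⟩

-- the core: sorted-list equality equals tally equality
theorem pvCore (a b : List String) :
    (PySem.List.sorted (a.map (fun c => PySem.Str.lower (strip_accents c))) (fun x => x) false ==
     PySem.List.sorted (b.map (fun c => PySem.Str.lower (strip_accents c))) (fun x => x) false) =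
    pvDictEq (pvTally a) (pvTally b) := by
  rw [Bool.eq_iff_iff, beq_iff_eq, pvTally_eq_counter, pvTally_eq_counter,
    pvDictEq_counter_iff, PySem.List.sorted_id_eq_sorted_id_iff_perm]
  exact List.perm_iff_count

-- ===== VERDICT (by name: the statement is the Claim_ definition above) =====
theorem fuzzy_client_eq_spec : Claim_equal_fuzzy_client_eq := by
  intro excel_clients db_client_str _
  unfold Spec_fuzzy_client_eq fuzzy_client_eq fuzzy_client_eq_alt
  match db_client_str with
  | none => rfl
  | some s =>
    simp only
    split
    · rfl
    · exact pvCore _ _
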